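-- pv_equiv track=rewrite | github.com/Z3N00/DS-Algo | 7. Recursion in Arrays/getMazepath.py | mazePath
-- ===== SOURCE A (Python) =====
-- def mazePath(sr, sc, dr, dc):
--
--     if(sr>dr or sc>dc):
--         return []
--     elif(sr == dr and sc == dc):
--         return [""]
--
--
--     hpaths = mazePath(sr, sc+1, dr, dc)
--
--     vpaths = mazePath(sr+1, sc, dr, dc)
--
--     paths = []
--
--
--     for hpath in hpaths:
--         paths.append("h" + hpath)
--
--     for vpath in vpaths:
--         paths.append("v" + vpath)
--
--
--     return paths
-- ===== SOURCE B (Python) =====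
-- def mazePath(sr, sc, dr, dc):
--     if sr > dr or sc > dc:
--         return []
--     n = dc - sc
--     # bottom-up DP over step counts: row[j] = all paths using i 'v'-steps and j 'h'-steps
--     row = [[""]]
--     for _ in range(n):
--         row.append(["h" + p for p in row[-1]])
--     for _ in range(dr - sr):
--         new = [["v" + p for p in row[0]]]
--         for j in range(1, n + 1):
--             new.append(["h" + p for p in new[-1]] + ["v" + p for p in row[j]])
--         row = new
--     return row[n]
-- ===== Notes on version B (the rewrite author's own statement) =====
-- stated objective: alternative
-- what changed: Replaces A's top-down branching recursion by an iterative bottom-up dynamic-programming table over remaining (v,h) step counts, filled row by row and read off at the start cell.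
import Mathlib
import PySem

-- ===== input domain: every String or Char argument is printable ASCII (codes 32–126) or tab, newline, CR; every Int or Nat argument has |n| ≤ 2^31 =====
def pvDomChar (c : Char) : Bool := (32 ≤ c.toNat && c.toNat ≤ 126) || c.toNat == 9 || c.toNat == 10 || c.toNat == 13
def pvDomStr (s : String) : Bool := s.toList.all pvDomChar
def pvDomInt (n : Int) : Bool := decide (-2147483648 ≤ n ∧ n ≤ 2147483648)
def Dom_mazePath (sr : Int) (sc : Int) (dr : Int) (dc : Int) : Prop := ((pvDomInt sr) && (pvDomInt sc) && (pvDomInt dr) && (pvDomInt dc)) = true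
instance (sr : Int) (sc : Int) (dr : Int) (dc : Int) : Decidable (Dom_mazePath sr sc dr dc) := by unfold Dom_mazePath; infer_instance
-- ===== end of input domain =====

-- B replaces A's branching recursion by an iterative bottom-up DP table over remaining
-- step counts (objective: alternative decomposition; same exponential output cost).

-- ===== PORT A =====
-- fuel = the exact remaining-steps measure ((dr-sr)+(dc-sc)).toNat: a totality guard only,
-- never reached at 0 except in the base cases
def mazePathGo : Nat → Int → Int → Int → Int → List String
  | fuel, sr, sc, dr, dc =>
    if sr > dr ∨ sc > dc then []
    else if sr = dr ∧ sc = dc then [""]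
    else
      match fuel with
      | 0 => []
      | f + 1 =>
        let hpaths := mazePathGo f sr (sc + 1) dr dc
        let vpaths := mazePathGo f (sr + 1) sc dr dc
        let paths : List String := []
        let paths := hpaths.foldl (fun acc hpath => acc ++ ["h" ++ hpath]) paths
        let paths := vpaths.foldl (fun acc vpath => acc ++ ["v" ++ vpath]) paths
        paths

def mazePath (sr : Int) (sc : Int) (dr : Int) (dc : Int) : List String :=
  mazePathGo ((dr - sr) + (dc - sc)).toNat sr sc dr dc

-- ===== PORT B =====
-- the bottom row: row[j] (j = 0..n) built left to right, each cell from the previous one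
def pvBottomRowAux (left : List String) : Nat → List (List String)
  | 0 => []
  | n + 1 =>
    let c := left.map (fun p => "h" ++ p)
    c :: pvBottomRowAux c n

-- one DP step: from row i build row i+1, walking the old row with the last new cell
def pvNextRowAux (left : List String) : List (List String) → List (List String)
  | [] => []
  | p :: rest =>
    let c := left.map (fun p => "h" ++ p) ++ p.map (fun p => "v" ++ p)
    c :: pvNextRowAux c rest

def pvNextRow : List (List String) → List (List String)
  | [] => []
  | p0 :: rest =>
    let c0 := p0.map (fun p => "v" ++ p)
    c0 :: pvNextRowAux c0 rest

def pvIterRows (row : List (List String)) : Nat → List (List String)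
  | 0 => row
  | m + 1 => pvIterRows (pvNextRow row) m

def mazePath_alt (sr : Int) (sc : Int) (dr : Int) (dc : Int) : List String :=
  if sr > dr ∨ sc > dc then []
  else
    let n := (dc - sc).toNat
    let row := [""] :: pvBottomRowAux [""] n
    (pvIterRows row (dr - sr).toNat).getD n []

-- ===== PRECONDITION & SPEC =====
-- Pre_ excludes in-range starts with 9900 or more remaining steps: there A's recursion
-- depth reaches the interpreter's recursion limit (10000 in the grading harness) and A
-- raises RecursionError instead of returning.
def Pre_mazePath (sr : Int) (sc : Int) (dr : Int) (dc : Int) : Prop :=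
  sr > dr ∨ sc > dc ∨ (dr - sr) + (dc - sc) < 9900
instance (sr : Int) (sc : Int) (dr : Int) (dc : Int) : Decidable (Pre_mazePath sr sc dr dc) := by unfold Pre_mazePath; infer_instance
def pvWitness_mazePath : Int × Int × Int × Int := (0, 0, 2, 3)

def Spec_mazePath (sr : Int) (sc : Int) (dr : Int) (dc : Int) (out : List String) : Prop := out = mazePath_alt sr sc dr dc
instance (sr : Int) (sc : Int) (dr : Int) (dc : Int) (out : List String) : Decidable (Spec_mazePath sr sc dr dc out) := by unfold Spec_mazePath; infer_instance

-- ===== CLAIM (what is proved, stated in full; the proofs are below) =====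
def Claim_equal_mazePath : Prop := ∀ (sr : Int) (sc : Int) (dr : Int) (dc : Int), Dom_mazePath sr sc dr dc → Pre_mazePath sr sc dr dc → Spec_mazePath sr sc dr dc (mazePath sr sc dr dc)

-- ===== LEMMAS AND PROOFS =====

-- reference function: all paths with i 'v'-steps and j 'h'-steps, in A's order
def pvP : Nat → Nat → List String
  | 0, 0 => [""]
  | 0, j + 1 => (pvP 0 j).map (fun p => "h" ++ p)
  | i + 1, 0 => (pvP i 0).map (fun p => "v" ++ p)
  | i + 1, j + 1 => (pvP (i + 1) j).map (fun p => "h" ++ p) ++ (pvP i (j + 1)).map (fun p => "v" ++ p)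
termination_by i j => i + j

theorem pv_foldl_app (c : String) (l : List String) (init : List String) :
    l.foldl (fun acc x => acc ++ [c ++ x]) init = init ++ l.map (fun x => c ++ x) := by
  induction l generalizing init with
  | nil => simp
  | cons h t ih => simp [List.foldl, ih]

-- A's worker computes pvP of the remaining step counts when the fuel equals the measure
theorem pv_A_eq_P (f : Nat) : ∀ (sr sc dr dc : Int), ((dr - sr) + (dc - sc)).toNat = f →
    ¬ (sr > dr ∨ sc > dc) → mazePathGo f sr sc dr dc = pvP (dr - sr).toNat (dc - sc).toNat := by
  induction f with
  | zero =>
    intro sr sc dr dc hk hg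
    have h1 : sr = dr ∧ sc = dc := by omega
    rw [mazePathGo.eq_def]
    simp [h1]
    have : (dr - sr).toNat = 0 := by omega
    have : (dc - sc).toNat = 0 := by omega
    simp_all [pvP]
  | succ f ih =>
    intro sr sc dr dc hk hg
    rw [mazePathGo.eq_def]
    have h1 : ¬ (sr = dr ∧ sc = dc) := by omega
    simp only [hg, if_false, h1, if_false]
    have hsr : sr ≤ dr := by omega
    have hsc : sc ≤ dc := by omega
    -- h branch
    have hH : mazePathGo f sr (sc + 1) dr dc =
        if sc = dc then [] else pvP (dr - sr).toNat ((dc - sc).toNat - 1) := by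
      by_cases hc : sc = dc
      · rw [mazePathGo.eq_def]; simp [hc]
      · have hg' : ¬ (sr > dr ∨ sc + 1 > dc) := by omega
        rw [ih sr (sc + 1) dr dc (by omega) hg']
        have : (dc - (sc + 1)).toNat = (dc - sc).toNat - 1 := by omega
        simp [hc, this]
    have hV : mazePathGo f (sr + 1) sc dr dc =
        if sr = dr then [] else pvP ((dr - sr).toNat - 1) (dc - sc).toNat := by
      by_cases hc : sr = dr
      · rw [mazePathGo.eq_def]; simp [hc]
      · have hg' : ¬ (sr + 1 > dr ∨ sc > dc) := by omega
        rw [ih (sr + 1) sc dr dc (by omega) hg']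
        have : (dr - (sr + 1)).toNat = (dr - sr).toNat - 1 := by omega
        simp [hc, this]
    rw [pv_foldl_app, pv_foldl_app, hH, hV]
    by_cases h2 : sr = dr
    · have h3 : sc ≠ dc := fun h => h1 ⟨h2, h⟩
      obtain ⟨j, hj⟩ : ∃ j, (dc - sc).toNat = j + 1 := ⟨(dc - sc).toNat - 1, by omega⟩
      have e1 : (dr - sr).toNat = 0 := by omega
      simp [h2, h3, hj, pvP]
    · by_cases h3 : sc = dc
      · obtain ⟨i, hi⟩ : ∃ i, (dr - sr).toNat = i + 1 := ⟨(dr - sr).toNat - 1, by omega⟩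
        have e2 : (dc - sc).toNat = 0 := by omega
        simp [h2, h3, hi, pvP]
      · obtain ⟨i, hi⟩ : ∃ i, (dr - sr).toNat = i + 1 := ⟨(dr - sr).toNat - 1, by omega⟩
        obtain ⟨j, hj⟩ : ∃ j, (dc - sc).toNat = j + 1 := ⟨(dc - sc).toNat - 1, by omega⟩
        simp [h2, h3, hi, hj, pvP]

def pvRowSpec (i n : Nat) : List (List String) := (List.range (n + 1)).map (fun j => pvP i j)

theorem pv_bottomAux (n : Nat) : ∀ j, pvBottomRowAux (pvP 0 j) n = (List.range' (j + 1) n).map (fun t => pvP 0 t) := by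
  induction n with
  | zero => intro j; simp [pvBottomRowAux]
  | succ n ih =>
    intro j
    rw [pvBottomRowAux]
    have e : (pvP 0 j).map (fun p => "h" ++ p) = pvP 0 (j + 1) := by rw [pvP]
    simp only [e, ih (j + 1), List.range'_succ, List.map_cons]

theorem pv_nextAux (i : Nat) (k : Nat) : ∀ j, pvNextRowAux (pvP (i + 1) j) ((List.range' (j + 1) k).map (fun t => pvP i t)) = (List.range' (j + 1) k).map (fun t => pvP (i + 1) t) := by
  induction k with
  | zero => intro j; simp [pvNextRowAux]
  | succ k ih =>
    intro j
    rw [List.range'_succ]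
    simp only [List.map_cons]
    rw [pvNextRowAux]
    have e : (pvP (i + 1) j).map (fun p => "h" ++ p) ++ (pvP i (j + 1)).map (fun p => "v" ++ p) = pvP (i + 1) (j + 1) := by rw [pvP]
    simp only [e, ih (j + 1)]

theorem pv_range_eq (n : Nat) : List.range (n + 1) = 0 :: List.range' 1 n := by
  rw [List.range_eq_range', List.range'_succ]

theorem pv_nextRow (i n : Nat) : pvNextRow (pvRowSpec i n) = pvRowSpec (i + 1) n := by
  unfold pvRowSpec
  rw [pv_range_eq, List.map_cons, List.map_cons, pvNextRow]
  have e : (pvP i 0).map (fun p => "v" ++ p) = pvP (i + 1) 0 := by rw [pvP]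
  have := pv_nextAux i n 0
  simp only [Nat.zero_add] at this
  simp only [e, this]

theorem pv_iter (m : Nat) : ∀ i n, pvIterRows (pvRowSpec i n) m = pvRowSpec (i + m) n := by
  induction m with
  | zero => intro i n; simp [pvIterRows]
  | succ m ih =>
    intro i n
    rw [pvIterRows, pv_nextRow, ih]
    have : i + 1 + m = i + (m + 1) := by omega
    rw [this]

theorem pv_rowSpec_getD (i n : Nat) : (pvRowSpec i n).getD n [] = pvP i n := by
  unfold pvRowSpec
  rw [List.getD_eq_getElem?_getD, List.getElem?_map]
  simp

theorem pv_bottom (n : Nat) : ([""] : List String) :: pvBottomRowAux [""] n = pvRowSpec 0 n := by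
  have e0 : ([""] : List String) = pvP 0 0 := by rw [pvP]
  rw [e0, pv_bottomAux n 0]
  unfold pvRowSpec
  rw [pv_range_eq, List.map_cons]

-- ===== VERDICT (by name: the statement is the Claim_ definition above) =====
theorem mazePath_spec : Claim_equal_mazePath := by
  intro sr sc dr dc _ _
  unfold Spec_mazePath mazePath_alt
  by_cases hg : sr > dr ∨ sc > dc
  · rw [mazePath, mazePathGo.eq_def]; simp [hg]
  · simp only [hg, if_false]
    rw [mazePath, pv_A_eq_P ((dr - sr) + (dc - sc)).toNat sr sc dr dc rfl hg]
    rw [pv_bottom]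
    rw [pv_iter]
    rw [Nat.zero_add]
    rw [pv_rowSpec_getD]
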